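-- pv_equiv track=rewrite | github.com/Anirudha-11a/HeadlinePulseee | utils.py | extract_headlines
-- ===== SOURCE A (Python) =====
-- def extract_headlines(cleaned_text: str) -> str:
--     headlines, current = [], []
--     for line in cleaned_text.splitlines():
--         if (l := line.strip()):
--             if l == "More" and current:
--                 headlines.append(current[0]); current = []
--             else:
--                 current.append(l)
--     if current:
--         headlines.append(current[0])
--     return "\n".join(headlines)
-- ===== SOURCE B (Python) =====
-- def extract_headlines(cleaned_text: str) -> str:
--     tokens = [s for ln in cleaned_text.splitlines() if (s := ln.strip())]
--     heads = []
--     i, n = 0, len(tokens)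
--     while i < n:
--         heads.append(tokens[i])          # a block's first token is its headline (even "More" at a block start)
--         i += 1
--         while i < n and tokens[i] != "More":
--             i += 1                       # skip the rest of the block
--         i += 1                           # skip the "More" delimiter
--     return "\n".join(heads)
-- ===== Notes on version B (the rewrite author's own statement) =====
-- stated objective: alternative
-- what changed: Replaces A's state machine (headlines list plus current-block buffer updated per line) with a block-jumping index scan over a pre-filtered token list: take the token at the block start as a headline, then advance the index past the next 'More' delimiter and repeat.
import Mathlib
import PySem

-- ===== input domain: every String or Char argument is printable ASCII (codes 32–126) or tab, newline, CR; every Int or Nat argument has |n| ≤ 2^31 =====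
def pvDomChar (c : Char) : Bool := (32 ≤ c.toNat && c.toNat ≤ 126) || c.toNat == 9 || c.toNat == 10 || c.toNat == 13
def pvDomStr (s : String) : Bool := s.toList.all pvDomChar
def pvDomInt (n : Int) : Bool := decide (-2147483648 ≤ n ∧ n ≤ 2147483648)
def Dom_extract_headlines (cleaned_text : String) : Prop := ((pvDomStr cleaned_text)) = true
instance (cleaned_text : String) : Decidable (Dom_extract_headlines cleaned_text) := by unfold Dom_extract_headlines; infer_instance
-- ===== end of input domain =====

-- B replaces A's per-line state machine (headlines + current-block buffer) with a block-jumping scan over a pre-filtered token list: take each block's first token, then skip past the next "More" delimiter; same cost, different decomposition.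


-- ===== PORT A =====
-- loop body of A: state = (headlines, current)
def pvStepA (st : List String × List String) (line : String) : List String × List String :=
  let l := PySem.Str.strip line
  if l ≠ "" then
    if l = "More" ∧ st.2 ≠ [] then (st.1 ++ [st.2.headD ""], ([] : List String))
    else (st.1, st.2 ++ [l])
  else st

def extract_headlines (cleaned_text : String) : String :=
  let st := (PySem.Str.splitlines cleaned_text).foldl pvStepA ([], [])
  let headlines := if st.2 ≠ [] then st.1 ++ [st.2.headD ""] else st.1
  PySem.Str.join "\n" headlines

-- ===== PORT B =====
-- the token comprehension of Source B: stripped, non-empty lines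
def pvTok (ln : String) : Option String :=
  let s := PySem.Str.strip ln
  if s = "" then none else some s

-- B's index-jumping scan, ported on the suffix of the token list: the outer while
-- takes the block's first token, the inner while ('skip to the next "More"') is the
-- dropWhile, and the final 'i += 1' is the '.drop 1'.
def pvHeads : List String → List String
  | [] => []
  | t :: r => t :: pvHeads ((r.dropWhile (fun x => x ≠ "More")).drop 1)
  termination_by ts => ts.length
  decreasing_by
    have := List.length_dropWhile_le (fun x => decide (x ≠ "More")) r
    simp only [List.length_drop, List.length_cons]
    omega

def extract_headlines_alt (cleaned_text : String) : String :=
  let tokens := (PySem.Str.splitlines cleaned_text).filterMap pvTok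
  PySem.Str.join "\n" (pvHeads tokens)

-- ===== PRECONDITION & SPEC =====
def Spec_extract_headlines (cleaned_text : String) (out : String) : Prop := out = extract_headlines_alt cleaned_text
instance (cleaned_text : String) (out : String) : Decidable (Spec_extract_headlines cleaned_text out) := by unfold Spec_extract_headlines; infer_instance

-- ===== CLAIM (what is proved, stated in full; the proofs are below) =====
def Claim_equal_extract_headlines : Prop := ∀ (cleaned_text : String), Dom_extract_headlines cleaned_text → Spec_extract_headlines cleaned_text (extract_headlines cleaned_text)

-- ===== LEMMAS AND PROOFS =====
theorem pvHeads_nil : pvHeads [] = [] := by simp [pvHeads]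

theorem pvHeads_cons (t : String) (r : List String) :
    pvHeads (t :: r) = t :: pvHeads ((r.dropWhile (fun x => x ≠ "More")).drop 1) := by
  rw [pvHeads]

-- A's step on the already-stripped, non-empty tokens
def pvStepT (st : List String × List String) (t : String) : List String × List String :=
  if t = "More" ∧ st.2 ≠ [] then (st.1 ++ [st.2.headD ""], ([] : List String))
  else (st.1, st.2 ++ [t])

-- A's per-line fold equals the token-level fold over the filtered tokens.
theorem pv_fold_filter (lines : List String) (st : List String × List String) :
    lines.foldl pvStepA st = (lines.filterMap pvTok).foldl pvStepT st := by
  induction lines generalizing st with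
  | nil => rfl
  | cons ln rest ih =>
    simp only [List.filterMap_cons, pvTok]
    by_cases h : PySem.Str.strip ln = ""
    · simp only [List.foldl_cons, h]
      have : pvStepA st ln = st := by simp [pvStepA, h]
      rw [this]; exact ih st
    · simp only [List.foldl_cons, if_neg h]
      have : pvStepA st ln = pvStepT st (PySem.Str.strip ln) := by
        simp [pvStepA, pvStepT, h]
      rw [this]; exact ih _

def pvFin (st : List String × List String) : List String :=
  if st.2 ≠ [] then st.1 ++ [st.2.headD ""] else st.1

-- The finalized token-level fold is hs ++ the block-skip (pvHeads) view of the tokens.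
theorem pv_fold_heads (tokens : List String) (hs cur : List String) :
    pvFin (tokens.foldl pvStepT (hs, cur))
      = hs ++ (match cur with
          | [] => pvHeads tokens
          | h :: _ => h :: pvHeads ((tokens.dropWhile (fun x => x ≠ "More")).drop 1)) := by
  induction tokens generalizing hs cur with
  | nil =>
    cases cur with
    | nil => simp [pvFin, pvHeads_nil]
    | cons h tl => simp [pvFin, pvHeads_nil]
  | cons t rest ih =>
    cases cur with
    | nil =>
      have hstep : pvStepT (hs, ([] : List String)) t = (hs, [t]) := by
        simp [pvStepT]
      simp only [List.foldl_cons, hstep]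
      rw [ih hs [t], pvHeads_cons]
    | cons h tl =>
      by_cases hm : t = "More"
      · have hstep : pvStepT (hs, h :: tl) t = (hs ++ [h], []) := by
          simp [pvStepT, hm]
        simp only [List.foldl_cons, hstep]
        rw [ih (hs ++ [h]) []]
        subst hm
        simp [List.dropWhile]
      · have hstep : pvStepT (hs, h :: tl) t = (hs, (h :: tl) ++ [t]) := by
          simp [pvStepT, hm]
        simp only [List.foldl_cons, hstep]
        rw [ih hs (h :: tl ++ [t])]
        simp [List.dropWhile, hm]

-- ===== VERDICT (by name: the statement is the Claim_ definition above) =====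
theorem extract_headlines_spec : Claim_equal_extract_headlines := by
  intro s _
  show extract_headlines s = extract_headlines_alt s
  show PySem.Str.join "\n" (pvFin ((PySem.Str.splitlines s).foldl pvStepA ([], [])))
      = PySem.Str.join "\n" (pvHeads ((PySem.Str.splitlines s).filterMap pvTok))
  rw [pv_fold_filter, pv_fold_heads]
  simp
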